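-- pv_equiv track=rewrite | github.com/JoshKing85/new_home_repository | Lab_7/assessed_lab_exercises.py | is_golden_number
-- ===== SOURCE A (Python) =====
-- def is_golden_number(n):
--
--     is_gold = False
--
--     # Nested loop to find summation of n
--     for a in range(n):
--         for b in range(n):
--
--             # Checks if argument meets all propositional statements.
--             if a + b == n and a*b % 1000 == 0:
--                 is_gold = True
--                 break
--
--
--     return is_gold
-- ===== SOURCE B (Python) =====
-- def is_golden_number(n):
--     # single pass: b is determined as n - a, so test each a directly
--     return any(a * (n - a) % 1000 == 0 for a in range(1, n))
-- ===== Notes on version B (the rewrite author's own statement) =====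
-- stated objective: faster
-- what changed: replaced the nested scan over all (a,b) pairs by a single loop over a with b computed as n-a
import Mathlib
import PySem

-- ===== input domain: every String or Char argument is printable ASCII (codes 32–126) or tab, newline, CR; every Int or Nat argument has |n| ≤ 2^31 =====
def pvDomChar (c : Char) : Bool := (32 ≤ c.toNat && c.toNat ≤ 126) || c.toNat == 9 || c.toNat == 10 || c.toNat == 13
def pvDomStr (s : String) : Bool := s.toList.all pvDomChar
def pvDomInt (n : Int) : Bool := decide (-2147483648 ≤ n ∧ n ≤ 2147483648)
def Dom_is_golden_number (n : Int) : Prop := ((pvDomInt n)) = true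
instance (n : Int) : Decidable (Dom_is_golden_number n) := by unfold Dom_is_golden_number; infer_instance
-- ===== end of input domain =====

-- B replaces A's nested O(n^2) scan over all (a,b) pairs by a single O(n) loop over a with b = n - a.

-- ===== PORT A =====
-- inner 'for b in range(n)' with its break: scan until the condition fires, else keep is_gold
def isGoldInner (n a : Int) (bs : List Int) (is_gold : Bool) : Bool :=
  match bs with
  | [] => is_gold
  | b :: rest =>
      if a + b == n && PySem.Int.mod (a * b) 1000 == 0 then true
      else isGoldInner n a rest is_gold

def is_golden_number (n : Int) : Bool :=
  (PySem.List.pyRange 0 n 1).foldl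
    (fun is_gold a => isGoldInner n a (PySem.List.pyRange 0 n 1) is_gold) false

-- ===== PORT B =====
def is_golden_number_alt (n : Int) : Bool :=
  (PySem.List.pyRange 1 n 1).any (fun a => PySem.Int.mod (a * (n - a)) 1000 == 0)

-- ===== PRECONDITION & SPEC =====
def Spec_is_golden_number (n : Int) (out : Bool) : Prop := out = is_golden_number_alt n
instance (n : Int) (out : Bool) : Decidable (Spec_is_golden_number n out) := by unfold Spec_is_golden_number; infer_instance

-- ===== CLAIM (what is proved, stated in full; the proofs are below) =====
def Claim_equal_is_golden_number : Prop := ∀ (n : Int), Dom_is_golden_number n → Spec_is_golden_number n (is_golden_number n)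

-- ===== LEMMAS AND PROOFS =====

theorem isGoldInner_eq_any (n a : Int) (bs : List Int) (g : Bool) :
    isGoldInner n a bs g =
      (g || bs.any (fun b => a + b == n && PySem.Int.mod (a * b) 1000 == 0)) := by
  induction bs with
  | nil => simp [isGoldInner]
  | cons b rest ih =>
      simp only [isGoldInner, List.any_cons]
      split_ifs with h
      · rw [h]; simp
      · rw [ih, Bool.eq_false_iff.mpr h]; cases g <;> simp

theorem foldl_or_any {α : Type} (f : α → Bool) (l : List α) (g : Bool) :
    l.foldl (fun acc x => acc || f x) g = (g || l.any f) := by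
  induction l generalizing g with
  | nil => simp
  | cons x rest ih => simp [List.foldl_cons, ih, Bool.or_assoc]

theorem is_golden_number_eq_any (n : Int) :
    is_golden_number n =
      (PySem.List.pyRange 0 n 1).any (fun a =>
        (PySem.List.pyRange 0 n 1).any (fun b =>
          a + b == n && PySem.Int.mod (a * b) 1000 == 0)) := by
  unfold is_golden_number
  have hcongr := PySem.List.foldl_congr_mem
    (l := PySem.List.pyRange 0 n 1) (init := false)
    (f := fun is_gold a => isGoldInner n a (PySem.List.pyRange 0 n 1) is_gold)
    (g := fun is_gold a => is_gold ||
      (PySem.List.pyRange 0 n 1).any (fun b => a + b == n && PySem.Int.mod (a * b) 1000 == 0))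
    (fun g a _ => isGoldInner_eq_any n a _ g)
  rw [hcongr, foldl_or_any]
  simp

-- ===== VERDICT (by name: the statement is the Claim_ definition above) =====
theorem is_golden_number_spec : Claim_equal_is_golden_number := by
  intro n _
  unfold Spec_is_golden_number
  rw [is_golden_number_eq_any]
  unfold is_golden_number_alt
  apply Bool.coe_iff_coe.mp
  simp only [List.any_eq_true, PySem.List.mem_pyRange_one, beq_iff_eq, Bool.and_eq_true]
  constructor
  · rintro ⟨a, ⟨ha0, han⟩, b, ⟨hb0, hbn⟩, hsum, hmod⟩
    refine ⟨a, ⟨by omega, han⟩, ?_⟩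
    have : n - a = b := by omega
    rw [this]; exact hmod
  · rintro ⟨a, ⟨ha1, han⟩, hmod⟩
    exact ⟨a, ⟨by omega, han⟩, n - a, ⟨by omega, by omega⟩, by omega, hmod⟩
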